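-- pv_equiv track=rewrite | github.com/sanket29/RAG24-BE | rag_model/adaptive_chunker.py | _find_best_boundary
-- ===== SOURCE A (Python) =====
-- from typing import List, Dict, Any, Optional, Tuple
--
-- def _find_best_boundary(all_boundaries: List[int], start: int, target_end: int,
--                        paragraph_boundaries: List[int], section_boundaries: List[int]) -> Optional[int]:
--     """Find the best boundary point near the target end position"""
--     # Look for boundaries within a reasonable range of the target
--     search_range = min(200, target_end - start // 4)  # 25% of chunk size or 200 chars
--     min_pos = max(start + 100, target_end - search_range)  # Don't make chunks too small
--     max_pos = target_end + search_range
--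
--     candidates = [b for b in all_boundaries if min_pos <= b <= max_pos]
--
--     if not candidates:
--         return None
--
--     # Prioritize different boundary types
--     for boundary in candidates:
--         if boundary in section_boundaries:
--             return boundary  # Highest priority: section boundaries
--
--     for boundary in candidates:
--         if boundary in paragraph_boundaries:
--             return boundary  # Medium priority: paragraph boundaries
--
--     # Return the closest sentence boundary to target
--     return min(candidates, key=lambda x: abs(x - target_end))
-- ===== SOURCE B (Python) =====
-- def _find_best_boundary(all_boundaries, start, target_end,
--                         paragraph_boundaries, section_boundaries):
--     """Single pass over all_boundaries keeping three aggregates instead of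
--     building a candidates list and scanning it three times."""
--     search_range = min(200, target_end - start // 4)
--     min_pos = max(start + 100, target_end - search_range)
--     max_pos = target_end + search_range
--
--     first_section = None
--     first_paragraph = None
--     closest = None
--     for b in all_boundaries:
--         if min_pos <= b <= max_pos:
--             if first_section is None and b in section_boundaries:
--                 first_section = b
--             if first_paragraph is None and b in paragraph_boundaries:
--                 first_paragraph = b
--             if closest is None or abs(b - target_end) < abs(closest - target_end):
--                 closest = b
--     if closest is None:
--         return None
--     if first_section is not None:
--         return first_section
--     if first_paragraph is not None:
--         return first_paragraph
--     return closest
-- ===== Notes on version B (the rewrite author's own statement) =====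
-- stated objective: alternative
-- what changed: Replaces the candidates-list construction plus three separate scans (section loop, paragraph loop, min by distance) with a single pass over all_boundaries maintaining three aggregates: first in-range section boundary, first in-range paragraph boundary, and the running closest boundary with strict-< tie-breaking.
import Mathlib
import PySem

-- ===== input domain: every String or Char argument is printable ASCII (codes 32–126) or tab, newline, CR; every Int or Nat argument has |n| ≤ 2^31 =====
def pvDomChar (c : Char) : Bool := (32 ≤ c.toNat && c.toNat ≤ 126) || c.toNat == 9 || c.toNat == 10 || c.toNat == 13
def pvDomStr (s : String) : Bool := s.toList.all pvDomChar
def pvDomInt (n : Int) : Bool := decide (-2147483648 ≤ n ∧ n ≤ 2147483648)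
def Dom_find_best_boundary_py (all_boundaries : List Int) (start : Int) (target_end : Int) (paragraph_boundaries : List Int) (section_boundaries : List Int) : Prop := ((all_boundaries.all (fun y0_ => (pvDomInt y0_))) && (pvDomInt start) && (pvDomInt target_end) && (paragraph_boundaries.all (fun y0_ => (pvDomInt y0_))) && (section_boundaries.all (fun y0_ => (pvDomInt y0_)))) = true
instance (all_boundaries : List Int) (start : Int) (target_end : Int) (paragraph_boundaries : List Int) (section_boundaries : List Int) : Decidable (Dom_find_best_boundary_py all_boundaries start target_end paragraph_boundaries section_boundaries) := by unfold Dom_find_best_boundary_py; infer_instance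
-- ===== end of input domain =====

-- B replaces A's candidates list and its three scans by one fold over all_boundaries
-- keeping (first section boundary, first paragraph boundary, running closest); same results.

-- ===== PORT A =====
def find_best_boundary_py (all_boundaries : List Int) (start : Int) (target_end : Int) (paragraph_boundaries : List Int) (section_boundaries : List Int) : Option Int :=
  let search_range := min 200 (target_end - PySem.Int.floordiv start 4)
  let min_pos := max (start + 100) (target_end - search_range)
  let max_pos := target_end + search_range
  let candidates := all_boundaries.filter (fun b => decide (min_pos ≤ b) && decide (b ≤ max_pos))
  if candidates = [] then none
  else
    match candidates.find? (fun b => section_boundaries.contains b) with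
    | some b => some b
    | none =>
      match candidates.find? (fun b => paragraph_boundaries.contains b) with
      | some b => some b
      | none => PySem.List.min? candidates (fun x => |x - target_end|)

-- ===== PORT B =====
-- B: one pass over all_boundaries maintaining (first_section, first_paragraph, closest)
def fbbStep (target_end : Int) (paragraph_boundaries section_boundaries : List Int)
    (min_pos max_pos : Int) (st : Option Int × Option Int × Option Int) (b : Int) :
    Option Int × Option Int × Option Int :=
  if min_pos ≤ b ∧ b ≤ max_pos then
    (if st.1 = none ∧ section_boundaries.contains b then some b else st.1,
     if st.2.1 = none ∧ paragraph_boundaries.contains b then some b else st.2.1,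
     match st.2.2 with
     | none => some b
     | some c => if |b - target_end| < |c - target_end| then some b else some c)
  else st

def find_best_boundary_py_alt (all_boundaries : List Int) (start : Int) (target_end : Int) (paragraph_boundaries : List Int) (section_boundaries : List Int) : Option Int :=
  let search_range := min 200 (target_end - PySem.Int.floordiv start 4)
  let min_pos := max (start + 100) (target_end - search_range)
  let max_pos := target_end + search_range
  let r := all_boundaries.foldl
    (fbbStep target_end paragraph_boundaries section_boundaries min_pos max_pos)
    (none, none, none)
  match r.2.2 with
  | none => none
  | some c =>
    match r.1 with
    | some s => some s
    | none =>
      match r.2.1 with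
      | some p => some p
      | none => some c

-- ===== PRECONDITION & SPEC =====
def Spec_find_best_boundary_py (all_boundaries : List Int) (start : Int) (target_end : Int) (paragraph_boundaries : List Int) (section_boundaries : List Int) (out : Option Int) : Prop := out = find_best_boundary_py_alt all_boundaries start target_end paragraph_boundaries section_boundaries
instance (all_boundaries : List Int) (start : Int) (target_end : Int) (paragraph_boundaries : List Int) (section_boundaries : List Int) (out : Option Int) : Decidable (Spec_find_best_boundary_py all_boundaries start target_end paragraph_boundaries section_boundaries out) := by unfold Spec_find_best_boundary_py; infer_instance

-- ===== CLAIM (what is proved, stated in full; the proofs are below) =====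
def Claim_equal_find_best_boundary_py : Prop := ∀ (all_boundaries : List Int) (start : Int) (target_end : Int) (paragraph_boundaries : List Int) (section_boundaries : List Int), Dom_find_best_boundary_py all_boundaries start target_end paragraph_boundaries section_boundaries → Spec_find_best_boundary_py all_boundaries start target_end paragraph_boundaries section_boundaries (find_best_boundary_py all_boundaries start target_end paragraph_boundaries section_boundaries)

-- ===== LEMMAS AND PROOFS =====

lemma fbb_fst (te : Int) (pb sb : List Int) (mn mx : Int) :
    ∀ (l : List Int) (st : Option Int × Option Int × Option Int),
      (List.foldl (fbbStep te pb sb mn mx) st l).1 =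
        st.1.or ((l.filter (fun b => decide (mn ≤ b) && decide (b ≤ mx))).find?
          (fun b => sb.contains b)) := by
  intro l
  induction l with
  | nil => intro st; simp
  | cons b t ih =>
    intro st
    by_cases h : mn ≤ b ∧ b ≤ mx
    · simp only [List.foldl_cons, fbbStep, if_pos h]
      rw [ih]
      rcases hst : st.1 with _ | s
      · by_cases hc : b ∈ sb <;> simp [hc, h.1, h.2]
      · simp [h.1, h.2]
    · have h' : ¬ (decide (mn ≤ b) && decide (b ≤ mx)) = true := by
        simpa [Decidable.not_and_iff_not_or_not] using h
      simp only [List.foldl_cons, fbbStep, if_neg h, List.filter_cons, h',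
        if_neg, Bool.false_eq_true, not_false_iff]
      exact ih st

lemma fbb_snd (te : Int) (pb sb : List Int) (mn mx : Int) :
    ∀ (l : List Int) (st : Option Int × Option Int × Option Int),
      (List.foldl (fbbStep te pb sb mn mx) st l).2.1 =
        st.2.1.or ((l.filter (fun b => decide (mn ≤ b) && decide (b ≤ mx))).find?
          (fun b => pb.contains b)) := by
  intro l
  induction l with
  | nil => intro st; simp
  | cons b t ih =>
    intro st
    by_cases h : mn ≤ b ∧ b ≤ mx
    · simp only [List.foldl_cons, fbbStep, if_pos h]
      rw [ih]
      rcases hst : st.2.1 with _ | p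
      · by_cases hc : b ∈ pb <;> simp [hc, h.1, h.2]
      · simp [h.1, h.2]
    · have h' : ¬ (decide (mn ≤ b) && decide (b ≤ mx)) = true := by
        simpa [Decidable.not_and_iff_not_or_not] using h
      simp only [List.foldl_cons, fbbStep, if_neg h, List.filter_cons, h',
        if_neg, Bool.false_eq_true, not_false_iff]
      exact ih st

lemma fbb_thd (te : Int) (pb sb : List Int) (mn mx : Int) :
    ∀ (l : List Int) (st : Option Int × Option Int × Option Int),
      (List.foldl (fbbStep te pb sb mn mx) st l).2.2 =
        List.foldl
          (fun acc x => match acc with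
            | none => some x
            | some m => if |x - te| < |m - te| then some x else some m)
          st.2.2 (l.filter (fun b => decide (mn ≤ b) && decide (b ≤ mx))) := by
  intro l
  induction l with
  | nil => intro st; simp
  | cons b t ih =>
    intro st
    by_cases h : mn ≤ b ∧ b ≤ mx
    · simp only [List.foldl_cons, fbbStep, if_pos h, List.filter_cons,
        h.1, h.2, decide_true, Bool.and_self, if_pos]
      exact ih _
    · have h' : ¬ (decide (mn ≤ b) && decide (b ≤ mx)) = true := by
        simpa [Decidable.not_and_iff_not_or_not] using h
      simp only [List.foldl_cons, fbbStep, if_neg h, List.filter_cons, h',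
        if_neg, Bool.false_eq_true, not_false_iff]
      exact ih st

lemma min?_as_foldl (cs : List Int) (te : Int) :
    PySem.List.min? cs (fun x => |x - te|) =
      List.foldl (fun acc x => match acc with
        | none => some x
        | some m => if |x - te| < |m - te| then some x else some m) none cs := by
  simp [PySem.List.min?]
  congr 1
  funext acc x
  rcases acc with _ | m
  · rfl
  · simp

-- ===== VERDICT (by name: the statement is the Claim_ definition above) =====
theorem find_best_boundary_py_spec : Claim_equal_find_best_boundary_py := by
  intro ab s te pb sb _
  unfold Spec_find_best_boundary_py find_best_boundary_py find_best_boundary_py_alt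
  simp only []
  set mn := max (s + 100) (te - min 200 (te - PySem.Int.floordiv s 4)) with hmn
  set mx := te + min 200 (te - PySem.Int.floordiv s 4) with hmx
  set cs := ab.filter (fun b => decide (mn ≤ b) && decide (b ≤ mx)) with hcs
  have h1 := fbb_fst te pb sb mn mx ab ((none : Option Int), (none : Option Int), (none : Option Int))
  have h2 := fbb_snd te pb sb mn mx ab ((none : Option Int), (none : Option Int), (none : Option Int))
  have h3 := fbb_thd te pb sb mn mx ab ((none : Option Int), (none : Option Int), (none : Option Int))
  simp only [Option.or, ← hcs] at h1 h2 h3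
  rcases hres : (List.foldl (fbbStep te pb sb mn mx) (none, none, none) ab) with ⟨fs, fp, cl⟩
  rw [hres] at h1 h2 h3
  simp only [] at h1 h2 h3
  have hmin : PySem.List.min? cs (fun x => |x - te|) = cl := by
    rw [min?_as_foldl, ← h3]
  rcases hcl : cl with _ | c
  · have hnil : cs = [] := by
      have := PySem.List.min?_eq_none_iff (xs := cs) (key := fun x => |x - te|)
      exact this.mp (by rw [hmin, hcl])
    simp [hnil]
  · have hne : ¬ cs = [] := by
      intro hn
      have hnone := (PySem.List.min?_eq_none_iff (xs := cs) (key := fun x => |x - te|)).mpr hn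
      rw [hmin, hcl] at hnone
      cases hnone
    rw [if_neg hne, ← h1, ← h2, hmin, hcl]
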